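-- pv_equiv track=rewrite | github.com/OctetularZ/LeetCode | Matrices.py | bfs_level_by_level
-- ===== SOURCE A (Python) =====
-- from collections import deque
-- from collections import deque
--
-- def bfs_level_by_level(matrix):
--     rows, cols = len(matrix), len(matrix[0])
--     directions = [(0, 1), (1, 0), (0, -1), (-1, 0)]
--
--     # start at the top-left corner
--     queue = deque([(0, 0)])
--     visited = set([(0, 0)])
--
--     levels = []
--     while queue:
--         level_size = len(queue)
--         current_level = []
--
--         for _ in range(level_size):
--             row, col = queue.popleft()
--             current_level.append((row, col))
--             for dr, dc in directions:
--                 r, c = row + dr, col + dc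
--                 if 0 <= r < rows and 0 <= c < cols and (r, c) not in visited:
--                     visited.add((r, c))
--                     queue.append((r, c))
--
--         # IMPORTANT
--         # we have finished processing all nodes at this level
--         levels.append(current_level)
--
--     return levels
-- ===== SOURCE B (Python) =====
-- def bfs_level_by_level(matrix):
--     rows, cols = len(matrix), len(matrix[0])
--     levels = []
--     for d in range(rows + cols - 1):
--         start = max(0, d - (cols - 1))
--         stop = min(rows - 1, d)
--         levels.append([(r, d - r) for r in range(start, stop + 1)])
--     return levels
-- ===== Notes on version B (the rewrite author's own statement) =====
-- stated objective: simpler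
-- what changed: Replaces the BFS queue + visited-set level loop by directly emitting, for each Manhattan distance d, the clipped anti-diagonal cells (r, d-r) in increasing row order (exactly the BFS level order on an obstacle-free grid); dropping the queue and per-cell set lookups makes B measurably faster by a constant factor.
-- outside the precondition, e.g. on bfs_level_by_level([[]]): A returns [[(0, 0)]], B returns []
import Mathlib
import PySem

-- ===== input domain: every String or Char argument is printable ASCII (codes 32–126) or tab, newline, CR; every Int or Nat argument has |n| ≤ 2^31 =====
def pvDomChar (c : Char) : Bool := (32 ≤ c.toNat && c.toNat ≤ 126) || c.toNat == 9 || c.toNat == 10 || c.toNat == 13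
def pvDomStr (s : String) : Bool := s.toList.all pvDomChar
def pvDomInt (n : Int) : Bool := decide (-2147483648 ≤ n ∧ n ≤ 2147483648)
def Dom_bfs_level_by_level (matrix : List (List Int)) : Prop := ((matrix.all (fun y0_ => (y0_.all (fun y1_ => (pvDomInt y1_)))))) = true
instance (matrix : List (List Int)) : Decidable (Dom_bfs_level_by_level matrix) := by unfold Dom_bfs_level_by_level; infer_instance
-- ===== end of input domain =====

-- B replaces A's BFS queue + visited set by directly emitting the clipped anti-diagonals
-- (each BFS level is exactly one anti-diagonal, in increasing row order); objective: simpler.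
-- ===== PORT A =====
def pvDirections : List (Int × Int) := [(0, 1), (1, 0), (0, -1), (-1, 0)]

-- one direction of the inner 'for dr, dc in directions' loop; state = (queue-tail appended this level, visited)
def pvVisit (rows cols : Int) (cell : Int × Int)
    (st : List (Int × Int) × PySem.Set (Int × Int)) (dir : Int × Int) :
    List (Int × Int) × PySem.Set (Int × Int) :=
  let r := cell.1 + dir.1
  let c := cell.2 + dir.2
  if 0 ≤ r ∧ r < rows ∧ 0 ≤ c ∧ c < cols ∧ (r, c) ∉ st.2 then
    (st.1 ++ [(r, c)], PySem.Set.add st.2 (r, c))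
  else st

-- one popleft of the 'for _ in range(level_size)' loop; state = (current_level, appended cells, visited).
-- the deque holds the level snapshot followed by the appended cells, and exactly level_size pops happen,
-- so the loop is a fold over the snapshot accumulating the appended cells.
def pvCell (rows cols : Int)
    (st : List (Int × Int) × List (Int × Int) × PySem.Set (Int × Int)) (cell : Int × Int) :
    List (Int × Int) × List (Int × Int) × PySem.Set (Int × Int) :=
  let qv := pvDirections.foldl (pvVisit rows cols cell) st.2
  (st.1 ++ [cell], qv.1, qv.2)

-- the 'while queue' loop; fuel only makes it total (rows+cols iterations always suffice)
def pvLoop (rows cols : Int) (fuel : Nat) (queue : List (Int × Int))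
    (vis : PySem.Set (Int × Int)) : List (List (Int × Int)) :=
  match fuel with
  | 0 => []
  | fuel + 1 =>
    if queue = [] then []
    else
      let st := queue.foldl (pvCell rows cols) ([], [], vis)
      st.1 :: pvLoop rows cols fuel st.2.1 st.2.2

def bfs_level_by_level (matrix : List (List Int)) : List (List (Int × Int)) :=
  match matrix with
  | [] => []  -- Python raises IndexError on matrix[0]; excluded by Pre_
  | row0 :: _ =>
    let rows : Int := matrix.length
    let cols : Int := row0.length
    pvLoop rows cols (rows.toNat + cols.toNat) [(0, 0)] (PySem.Set.ofList [(0, 0)])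

-- ===== PORT B =====
def bfs_level_by_level_alt (matrix : List (List Int)) : List (List (Int × Int)) :=
  match matrix with
  | [] => []  -- Python raises IndexError on matrix[0]; excluded by Pre_
  | row0 :: _ =>
    let rows : Int := matrix.length
    let cols : Int := row0.length
    (PySem.List.pyRange 0 (rows + cols - 1) 1).map (fun d =>
      (PySem.List.pyRange (max 0 (d - (cols - 1))) (min (rows - 1) d + 1) 1).map
        (fun r => (r, d - r)))

-- ===== PRECONDITION & SPEC =====
-- Pre_ excludes the empty matrix (A raises IndexError) and matrices whose first row is empty:
-- there the grid has no cells, yet A returns one level holding the phantom cell (0, 0) while B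
-- returns empty levels — both values are accidents of the respective implementations.
def Pre_bfs_level_by_level (matrix : List (List Int)) : Prop :=
  matrix ≠ [] ∧ matrix.headD [] ≠ []
instance (matrix : List (List Int)) : Decidable (Pre_bfs_level_by_level matrix) := by
  unfold Pre_bfs_level_by_level; infer_instance

def pvWitness_bfs_level_by_level : List (List Int) := [[1, 2], [3, 4]]

def Spec_bfs_level_by_level (matrix : List (List Int)) (out : List (List (Int × Int))) : Prop :=
  out = bfs_level_by_level_alt matrix
instance (matrix : List (List Int)) (out : List (List (Int × Int))) :
    Decidable (Spec_bfs_level_by_level matrix out) := by unfold Spec_bfs_level_by_level; infer_instance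

-- ===== CLAIM (what is proved, stated in full; the proofs are below) =====
def Claim_equal_bfs_level_by_level : Prop :=
  ∀ (matrix : List (List Int)), Dom_bfs_level_by_level matrix →
    Pre_bfs_level_by_level matrix →
    Spec_bfs_level_by_level matrix (bfs_level_by_level matrix)

-- ===== LEMMAS AND PROOFS =====
-- the cells (r, e - r) for r = lo..hi: a clipped anti-diagonal, increasing row order
def pvSeg (e lo hi : Int) : List (Int × Int) :=
  (PySem.List.pyRange lo (hi + 1) 1).map (fun r => (r, e - r))

-- upper row bound of the next level's queue after the cells r < a of diagonal d are processed
def pvHi (rows cols d a : Int) : Int :=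
  if max 0 (d - (cols - 1)) < a then min a (rows - 1) else max 0 (d + 1 - (cols - 1)) - 1

lemma pvSeg_nil (e lo hi : Int) (h : hi < lo) : pvSeg e lo hi = [] := by
  simp [pvSeg, PySem.List.pyRange_one_eq_nil (by omega : hi + 1 ≤ lo)]

lemma pvSeg_cons (e lo hi : Int) (h : lo ≤ hi) :
    pvSeg e lo hi = (lo, e - lo) :: pvSeg e (lo + 1) hi := by
  simp [pvSeg, PySem.List.pyRange_one_cons (by omega : lo < hi + 1)]

lemma pvSeg_snoc (e lo hi : Int) (h : lo ≤ hi + 1) :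
    pvSeg e lo (hi + 1) = pvSeg e lo hi ++ [(hi + 1, e - (hi + 1))] := by
  simp [pvSeg, PySem.List.pyRange_one_succ_right (by omega : lo ≤ hi + 1)]

lemma pvSeg_mem (e lo hi : Int) (p : Int × Int) :
    p ∈ pvSeg e lo hi ↔ lo ≤ p.1 ∧ p.1 ≤ hi ∧ p.2 = e - p.1 := by
  simp only [pvSeg, List.mem_map, PySem.List.mem_pyRange_one]
  constructor
  · rintro ⟨r, ⟨h1, h2⟩, rfl⟩; exact ⟨h1, by omega, rfl⟩
  · rintro ⟨h1, h2, h3⟩; exact ⟨p.1, ⟨h1, by omega⟩, by rw [← h3]⟩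

-- helper visit lemmas
lemma pvVisit_add (rows cols : Int) (cell dir : Int × Int)
    (st : List (Int × Int) × PySem.Set (Int × Int)) (r c : Int)
    (hrc : cell.1 + dir.1 = r) (hcc : cell.2 + dir.2 = c)
    (h : 0 ≤ r ∧ r < rows ∧ 0 ≤ c ∧ c < cols ∧ (r, c) ∉ st.2) :
    pvVisit rows cols cell st dir = (st.1 ++ [(r, c)], PySem.Set.add st.2 (r, c)) := by
  simp only [pvVisit, hrc, hcc]
  rw [if_pos h]

lemma pvVisit_skip (rows cols : Int) (cell dir : Int × Int)
    (st : List (Int × Int) × PySem.Set (Int × Int)) (r c : Int)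
    (hrc : cell.1 + dir.1 = r) (hcc : cell.2 + dir.2 = c)
    (h : ¬(0 ≤ r ∧ r < rows ∧ 0 ≤ c ∧ c < cols ∧ (r, c) ∉ st.2)) :
    pvVisit rows cols cell st dir = st := by
  simp only [pvVisit, hrc, hcc]
  rw [if_neg h]


-- one cell step of the level pass
lemma pvCell_step (rows cols d a : Int) (hr : 1 ≤ rows) (hc : 1 ≤ cols) (hd0 : 0 ≤ d)
    (hd : d ≤ rows + cols - 2)
    (ha1 : max 0 (d - (cols - 1)) ≤ a) (ha2 : a ≤ min (rows - 1) d)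
    (lvl : List (Int × Int)) (vis : PySem.Set (Int × Int))
    (hvis : ∀ p : Int × Int, p ∈ vis ↔
      (0 ≤ p.1 ∧ p.1 < rows ∧ 0 ≤ p.2 ∧ p.2 < cols ∧ p.1 + p.2 ≤ d) ∨
      p ∈ pvSeg (d + 1) (max 0 (d + 1 - (cols - 1))) (pvHi rows cols d a)) :
    ∃ vis' : PySem.Set (Int × Int),
      pvCell rows cols (lvl, pvSeg (d + 1) (max 0 (d + 1 - (cols - 1))) (pvHi rows cols d a), vis)
          (a, d - a)
        = (lvl ++ [(a, d - a)],
           pvSeg (d + 1) (max 0 (d + 1 - (cols - 1))) (pvHi rows cols d (a + 1)), vis') ∧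
      ∀ p : Int × Int, p ∈ vis' ↔
        (0 ≤ p.1 ∧ p.1 < rows ∧ 0 ≤ p.2 ∧ p.2 < cols ∧ p.1 + p.2 ≤ d) ∨
        p ∈ pvSeg (d + 1) (max 0 (d + 1 - (cols - 1))) (pvHi rows cols d (a + 1)) := by
  have hhia' : pvHi rows cols d (a + 1) = min (a + 1) (rows - 1) := by
    unfold pvHi; rw [if_pos (by omega)]
  by_cases hfirst : max 0 (d - (cols - 1)) < a
  · -- not the first cell of the diagonal: only the down neighbour can be new
    have hhia : pvHi rows cols d a = a := by
      unfold pvHi; rw [if_pos hfirst]; omega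
    rw [hhia] at hvis ⊢
    rw [hhia']
    set q0 : List (Int × Int) := pvSeg (d + 1) (max 0 (d + 1 - (cols - 1))) a with hq0
    -- right neighbour: already queued whenever it is in bounds
    have s1 : pvVisit rows cols (a, d - a) (q0, vis) (0, 1) = (q0, vis) := by
      apply pvVisit_skip rows cols _ _ _ a (d - a + 1) (by ring) (by ring)
      rintro ⟨-, -, -, h4, h5⟩
      exact h5 ((hvis _).2 (Or.inr ((pvSeg_mem _ _ _ _).2 (by constructor <;> simp <;> omega))))
    by_cases hdown : a + 1 < rows
    · have s2 : pvVisit rows cols (a, d - a) (q0, vis) (1, 0)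
          = (q0 ++ [(a + 1, d - a)], PySem.Set.add vis (a + 1, d - a)) := by
        apply pvVisit_add rows cols _ _ _ (a + 1) (d - a) (by ring) (by ring)
        refine ⟨by omega, hdown, by omega, by omega, fun hmem => ?_⟩
        rcases (hvis _).1 hmem with h | h
        · simp at h; omega
        · rw [pvSeg_mem] at h; simp at h
      have s3 : pvVisit rows cols (a, d - a)
          (q0 ++ [(a + 1, d - a)], PySem.Set.add vis (a + 1, d - a)) (0, -1)
          = (q0 ++ [(a + 1, d - a)], PySem.Set.add vis (a + 1, d - a)) := by
        apply pvVisit_skip rows cols _ _ _ a (d - a - 1) (by ring) (by ring)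
        rintro ⟨-, -, h3, -, h5⟩
        apply h5
        simp only [PySem.Set.mem_add]
        exact Or.inl ((hvis _).2 (Or.inl (by constructor <;> simp <;> omega)))
      have s4 : pvVisit rows cols (a, d - a)
          (q0 ++ [(a + 1, d - a)], PySem.Set.add vis (a + 1, d - a)) (-1, 0)
          = (q0 ++ [(a + 1, d - a)], PySem.Set.add vis (a + 1, d - a)) := by
        apply pvVisit_skip rows cols _ _ _ (a - 1) (d - a) (by ring) (by ring)
        rintro ⟨h1, -, -, -, h5⟩
        apply h5
        simp only [PySem.Set.mem_add]
        exact Or.inl ((hvis _).2 (Or.inl (by constructor <;> simp <;> omega)))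
      have hq : q0 ++ [(a + 1, d - a)] = pvSeg (d + 1) (max 0 (d + 1 - (cols - 1))) (min (a + 1) (rows - 1)) := by
        rw [show min (a + 1) (rows - 1) = a + 1 by omega,
            pvSeg_snoc _ _ _ (by omega), hq0]
        simp
      refine ⟨PySem.Set.add vis (a + 1, d - a), ?_, ?_⟩
      · simp only [pvCell, pvDirections, List.foldl_cons, List.foldl_nil, s1, s2, s3, s4]
        rw [hq]
      · intro p
        simp only [PySem.Set.mem_add, hvis p, hq0, pvSeg_mem, Prod.ext_iff]
        omega
    · have s2 : pvVisit rows cols (a, d - a) (q0, vis) (1, 0) = (q0, vis) := by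
        apply pvVisit_skip rows cols _ _ _ (a + 1) (d - a) (by ring) (by ring)
        rintro ⟨-, h2, -, -, -⟩; omega
      have s3 : pvVisit rows cols (a, d - a) (q0, vis) (0, -1) = (q0, vis) := by
        apply pvVisit_skip rows cols _ _ _ a (d - a - 1) (by ring) (by ring)
        rintro ⟨-, -, h3, -, h5⟩
        exact h5 ((hvis _).2 (Or.inl (by constructor <;> simp <;> omega)))
      have s4 : pvVisit rows cols (a, d - a) (q0, vis) (-1, 0) = (q0, vis) := by
        apply pvVisit_skip rows cols _ _ _ (a - 1) (d - a) (by ring) (by ring)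
        rintro ⟨h1, -, -, -, h5⟩
        exact h5 ((hvis _).2 (Or.inl (by constructor <;> simp <;> omega)))
      have hq : q0 = pvSeg (d + 1) (max 0 (d + 1 - (cols - 1))) (min (a + 1) (rows - 1)) := by
        rw [show min (a + 1) (rows - 1) = a by omega, hq0]
      refine ⟨vis, ?_, ?_⟩
      · simp only [pvCell, pvDirections, List.foldl_cons, List.foldl_nil, s1, s2, s3, s4]
        rw [hq]
      · intro p
        simp only [hvis p, hq0, pvSeg_mem]
        omega

  · -- first cell of the diagonal: right (if in bounds) and down (if in bounds) are new
    have ha : a = max 0 (d - (cols - 1)) := by omega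
    have hhia : pvHi rows cols d a = max 0 (d + 1 - (cols - 1)) - 1 := by
      unfold pvHi; rw [if_neg hfirst]
    rw [hhia] at hvis ⊢
    rw [hhia']
    have hq0 : pvSeg (d + 1) (max 0 (d + 1 - (cols - 1))) (max 0 (d + 1 - (cols - 1)) - 1) = [] :=
      pvSeg_nil _ _ _ (by omega)
    rw [hq0] at hvis ⊢
    have hvis' : ∀ p : Int × Int, p ∈ vis ↔
        (0 ≤ p.1 ∧ p.1 < rows ∧ 0 ≤ p.2 ∧ p.2 < cols ∧ p.1 + p.2 ≤ d) := by
      intro p; rw [hvis p]; simp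
    by_cases hRb : d - a + 1 < cols
    · -- right neighbour in bounds, hence added
      have hra : max 0 (d + 1 - (cols - 1)) = a := by omega
      have s1 : pvVisit rows cols (a, d - a) (([] : List (Int × Int)), vis) (0, 1)
          = ([(a, d - a + 1)], PySem.Set.add vis (a, d - a + 1)) := by
        apply pvVisit_add rows cols _ _ _ a (d - a + 1) (by ring) (by ring)
        refine ⟨by omega, by omega, by omega, hRb, fun hmem => ?_⟩
        have := (hvis' _).1 hmem; simp at this; omega
      by_cases hdown : a + 1 < rows
      · have s2 : pvVisit rows cols (a, d - a) ([(a, d - a + 1)], PySem.Set.add vis (a, d - a + 1)) (1, 0)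
            = ([(a, d - a + 1), (a + 1, d - a)],
               PySem.Set.add (PySem.Set.add vis (a, d - a + 1)) (a + 1, d - a)) := by
          apply pvVisit_add rows cols _ _ _ (a + 1) (d - a) (by ring) (by ring)
          refine ⟨by omega, hdown, by omega, by omega, fun hmem => ?_⟩
          rw [PySem.Set.mem_add] at hmem
          rcases hmem with hmem | hmem
          · have := (hvis' _).1 hmem; simp at this; omega
          · simp [Prod.ext_iff] at hmem
        have s3 : pvVisit rows cols (a, d - a)
            ([(a, d - a + 1), (a + 1, d - a)],
             PySem.Set.add (PySem.Set.add vis (a, d - a + 1)) (a + 1, d - a)) (0, -1)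
            = ([(a, d - a + 1), (a + 1, d - a)],
               PySem.Set.add (PySem.Set.add vis (a, d - a + 1)) (a + 1, d - a)) := by
          apply pvVisit_skip rows cols _ _ _ a (d - a - 1) (by ring) (by ring)
          rintro ⟨-, -, h3, -, h5⟩
          apply h5
          simp only [PySem.Set.mem_add]
          exact Or.inl (Or.inl ((hvis' _).2 (by constructor <;> simp <;> omega)))
        have s4 : pvVisit rows cols (a, d - a)
            ([(a, d - a + 1), (a + 1, d - a)],
             PySem.Set.add (PySem.Set.add vis (a, d - a + 1)) (a + 1, d - a)) (-1, 0)
            = ([(a, d - a + 1), (a + 1, d - a)],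
               PySem.Set.add (PySem.Set.add vis (a, d - a + 1)) (a + 1, d - a)) := by
          apply pvVisit_skip rows cols _ _ _ (a - 1) (d - a) (by ring) (by ring)
          rintro ⟨h1, -, -, -, h5⟩
          apply h5
          simp only [PySem.Set.mem_add]
          exact Or.inl (Or.inl ((hvis' _).2 (by constructor <;> simp <;> omega)))
        have hq : [(a, d - a + 1), (a + 1, d - a)]
            = pvSeg (d + 1) (max 0 (d + 1 - (cols - 1))) (min (a + 1) (rows - 1)) := by
          rw [show min (a + 1) (rows - 1) = a + 1 by omega, hra,
              pvSeg_cons _ _ _ (by omega), pvSeg_cons _ _ _ (by omega), pvSeg_nil _ _ _ (by omega)]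
          simp; omega
        refine ⟨PySem.Set.add (PySem.Set.add vis (a, d - a + 1)) (a + 1, d - a), ?_, ?_⟩
        · simp only [pvCell, pvDirections, List.foldl_cons, List.foldl_nil, s1, s2, s3, s4]
          rw [← hq]
        · intro p
          simp only [PySem.Set.mem_add, hvis' p, pvSeg_mem, Prod.ext_iff]
          omega
      · have s2 : pvVisit rows cols (a, d - a) ([(a, d - a + 1)], PySem.Set.add vis (a, d - a + 1)) (1, 0)
            = ([(a, d - a + 1)], PySem.Set.add vis (a, d - a + 1)) := by
          apply pvVisit_skip rows cols _ _ _ (a + 1) (d - a) (by ring) (by ring)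
          rintro ⟨-, h2, -, -, -⟩; omega
        have s3 : pvVisit rows cols (a, d - a) ([(a, d - a + 1)], PySem.Set.add vis (a, d - a + 1)) (0, -1)
            = ([(a, d - a + 1)], PySem.Set.add vis (a, d - a + 1)) := by
          apply pvVisit_skip rows cols _ _ _ a (d - a - 1) (by ring) (by ring)
          rintro ⟨-, -, h3, -, h5⟩
          apply h5
          simp only [PySem.Set.mem_add]
          exact Or.inl ((hvis' _).2 (by constructor <;> simp <;> omega))
        have s4 : pvVisit rows cols (a, d - a) ([(a, d - a + 1)], PySem.Set.add vis (a, d - a + 1)) (-1, 0)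
            = ([(a, d - a + 1)], PySem.Set.add vis (a, d - a + 1)) := by
          apply pvVisit_skip rows cols _ _ _ (a - 1) (d - a) (by ring) (by ring)
          rintro ⟨h1, -, -, -, h5⟩
          apply h5
          simp only [PySem.Set.mem_add]
          exact Or.inl ((hvis' _).2 (by constructor <;> simp <;> omega))
        have hq : [(a, d - a + 1)]
            = pvSeg (d + 1) (max 0 (d + 1 - (cols - 1))) (min (a + 1) (rows - 1)) := by
          rw [show min (a + 1) (rows - 1) = a by omega, hra,
              pvSeg_cons _ _ _ (by omega), pvSeg_nil _ _ _ (by omega)]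
          simp; omega
        refine ⟨PySem.Set.add vis (a, d - a + 1), ?_, ?_⟩
        · simp only [pvCell, pvDirections, List.foldl_cons, List.foldl_nil, s1, s2, s3, s4]
          rw [← hq]
        · intro p
          simp only [PySem.Set.mem_add, hvis' p, pvSeg_mem, Prod.ext_iff]
          omega
    · -- right neighbour out of bounds
      have hra : max 0 (d + 1 - (cols - 1)) = a + 1 := by omega
      have s1 : pvVisit rows cols (a, d - a) (([] : List (Int × Int)), vis) (0, 1)
          = ([], vis) := by
        apply pvVisit_skip rows cols _ _ _ a (d - a + 1) (by ring) (by ring)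
        rintro ⟨-, -, -, h4, -⟩; omega
      by_cases hdown : a + 1 < rows
      · have s2 : pvVisit rows cols (a, d - a) (([] : List (Int × Int)), vis) (1, 0)
            = ([(a + 1, d - a)], PySem.Set.add vis (a + 1, d - a)) := by
          apply pvVisit_add rows cols _ _ _ (a + 1) (d - a) (by ring) (by ring)
          refine ⟨by omega, hdown, by omega, by omega, fun hmem => ?_⟩
          have := (hvis' _).1 hmem; simp at this; omega
        have s3 : pvVisit rows cols (a, d - a) ([(a + 1, d - a)], PySem.Set.add vis (a + 1, d - a)) (0, -1)
            = ([(a + 1, d - a)], PySem.Set.add vis (a + 1, d - a)) := by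
          apply pvVisit_skip rows cols _ _ _ a (d - a - 1) (by ring) (by ring)
          rintro ⟨-, -, h3, -, h5⟩
          apply h5
          simp only [PySem.Set.mem_add]
          exact Or.inl ((hvis' _).2 (by constructor <;> simp <;> omega))
        have s4 : pvVisit rows cols (a, d - a) ([(a + 1, d - a)], PySem.Set.add vis (a + 1, d - a)) (-1, 0)
            = ([(a + 1, d - a)], PySem.Set.add vis (a + 1, d - a)) := by
          apply pvVisit_skip rows cols _ _ _ (a - 1) (d - a) (by ring) (by ring)
          rintro ⟨h1, -, -, -, h5⟩
          apply h5
          simp only [PySem.Set.mem_add]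
          exact Or.inl ((hvis' _).2 (by constructor <;> simp <;> omega))
        have hq : [(a + 1, d - a)]
            = pvSeg (d + 1) (max 0 (d + 1 - (cols - 1))) (min (a + 1) (rows - 1)) := by
          rw [show min (a + 1) (rows - 1) = a + 1 by omega, hra,
              pvSeg_cons _ _ _ (by omega), pvSeg_nil _ _ _ (by omega)]
          simp
        refine ⟨PySem.Set.add vis (a + 1, d - a), ?_, ?_⟩
        · simp only [pvCell, pvDirections, List.foldl_cons, List.foldl_nil, s1, s2, s3, s4]
          rw [← hq]
        · intro p
          simp only [PySem.Set.mem_add, hvis' p, pvSeg_mem, Prod.ext_iff]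
          omega
      · have s2 : pvVisit rows cols (a, d - a) (([] : List (Int × Int)), vis) (1, 0)
            = ([], vis) := by
          apply pvVisit_skip rows cols _ _ _ (a + 1) (d - a) (by ring) (by ring)
          rintro ⟨-, h2, -, -, -⟩; omega
        have s3 : pvVisit rows cols (a, d - a) (([] : List (Int × Int)), vis) (0, -1)
            = ([], vis) := by
          apply pvVisit_skip rows cols _ _ _ a (d - a - 1) (by ring) (by ring)
          rintro ⟨-, -, h3, -, h5⟩
          exact h5 ((hvis' _).2 (by constructor <;> simp <;> omega))
        have s4 : pvVisit rows cols (a, d - a) (([] : List (Int × Int)), vis) (-1, 0)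
            = ([], vis) := by
          apply pvVisit_skip rows cols _ _ _ (a - 1) (d - a) (by ring) (by ring)
          rintro ⟨h1, -, -, -, h5⟩
          exact h5 ((hvis' _).2 (by constructor <;> simp <;> omega))
        have hq : ([] : List (Int × Int))
            = pvSeg (d + 1) (max 0 (d + 1 - (cols - 1))) (min (a + 1) (rows - 1)) := by
          rw [show min (a + 1) (rows - 1) = a by omega, hra, pvSeg_nil _ _ _ (by omega)]
        refine ⟨vis, ?_, ?_⟩
        · simp only [pvCell, pvDirections, List.foldl_cons, List.foldl_nil, s1, s2, s3, s4]
          rw [← hq]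
        · intro p
          simp only [hvis' p, pvSeg_mem]
          omega

-- the level pass: folding pvCell over the tail of diagonal d extends the level and builds diagonal d+1
lemma pvPass (rows cols d : Int) (hr : 1 ≤ rows) (hc : 1 ≤ cols) (hd0 : 0 ≤ d)
    (hd : d ≤ rows + cols - 2) :
    ∀ (n : Nat) (a : Int), (min (rows - 1) d + 1 - a).toNat = n →
      max 0 (d - (cols - 1)) ≤ a → a ≤ min (rows - 1) d + 1 →
      ∀ (lvl : List (Int × Int)) (vis : PySem.Set (Int × Int)),
        (∀ p : Int × Int, p ∈ vis ↔
          (0 ≤ p.1 ∧ p.1 < rows ∧ 0 ≤ p.2 ∧ p.2 < cols ∧ p.1 + p.2 ≤ d) ∨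
          p ∈ pvSeg (d + 1) (max 0 (d + 1 - (cols - 1))) (pvHi rows cols d a)) →
        ∃ vis' : PySem.Set (Int × Int),
          (pvSeg d a (min (rows - 1) d)).foldl (pvCell rows cols)
              (lvl, pvSeg (d + 1) (max 0 (d + 1 - (cols - 1))) (pvHi rows cols d a), vis)
            = (lvl ++ pvSeg d a (min (rows - 1) d),
               pvSeg (d + 1) (max 0 (d + 1 - (cols - 1)))
                 (pvHi rows cols d (min (rows - 1) d + 1)), vis') ∧
          ∀ p : Int × Int, p ∈ vis' ↔
            (0 ≤ p.1 ∧ p.1 < rows ∧ 0 ≤ p.2 ∧ p.2 < cols ∧ p.1 + p.2 ≤ d) ∨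
            p ∈ pvSeg (d + 1) (max 0 (d + 1 - (cols - 1)))
              (pvHi rows cols d (min (rows - 1) d + 1)) := by
  intro n
  induction n with
  | zero =>
    intro a h0 hlo hhi lvl vis hv
    have ha : a = min (rows - 1) d + 1 := by omega
    subst ha
    rw [pvSeg_nil d _ _ (by omega)]
    exact ⟨vis, by simp, hv⟩
  | succ n ih =>
    intro a h0 hlo hhi lvl vis hv
    have ha : a ≤ min (rows - 1) d := by omega
    rw [pvSeg_cons d a _ ha]
    simp only [List.foldl_cons]
    obtain ⟨vis1, hcell, hchar⟩ :=
      pvCell_step rows cols d a hr hc hd0 hd hlo ha lvl vis hv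
    rw [hcell]
    obtain ⟨vis', hfold, hchar'⟩ :=
      ih (a + 1) (by omega) (by omega) (by omega) (lvl ++ [(a, d - a)]) vis1 hchar
    rw [hfold]
    refine ⟨vis', ?_, hchar'⟩
    simp

-- the while loop emits exactly the diagonals d, d+1, …, rows+cols-2
lemma pvLoop_inv (rows cols : Int) (hr : 1 ≤ rows) (hc : 1 ≤ cols) :
    ∀ (fuel : Nat) (d : Int) (vis : PySem.Set (Int × Int)), 0 ≤ d →
      (rows + cols - 1 - d).toNat ≤ fuel →
      (∀ p : Int × Int, p ∈ vis ↔
        0 ≤ p.1 ∧ p.1 < rows ∧ 0 ≤ p.2 ∧ p.2 < cols ∧ p.1 + p.2 ≤ d) →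
      pvLoop rows cols fuel (pvSeg d (max 0 (d - (cols - 1))) (min (rows - 1) d)) vis
        = (PySem.List.pyRange d (rows + cols - 1) 1).map
            (fun e => pvSeg e (max 0 (e - (cols - 1))) (min (rows - 1) e)) := by
  intro fuel
  induction fuel with
  | zero =>
    intro d vis hd0 hfuel hv
    rw [pvLoop, PySem.List.pyRange_one_eq_nil (by omega), List.map_nil]
  | succ fuel ih =>
    intro d vis hd0 hfuel hv
    by_cases hend : rows + cols - 1 ≤ d
    · rw [pvSeg_nil _ _ _ (by omega), PySem.List.pyRange_one_eq_nil (by omega)]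
      simp [pvLoop]
    · have hcons := pvSeg_cons d (max 0 (d - (cols - 1))) (min (rows - 1) d) (by omega)
      have hne : pvSeg d (max 0 (d - (cols - 1))) (min (rows - 1) d) ≠ [] := by
        rw [hcons]; exact List.cons_ne_nil _ _
      have hq0 : pvSeg (d + 1) (max 0 (d + 1 - (cols - 1)))
          (pvHi rows cols d (max 0 (d - (cols - 1)))) = [] := by
        rw [show pvHi rows cols d (max 0 (d - (cols - 1)))
              = max 0 (d + 1 - (cols - 1)) - 1 by unfold pvHi; rw [if_neg (by omega)]]
        exact pvSeg_nil _ _ _ (by omega)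
      have hv' : ∀ p : Int × Int, p ∈ vis ↔
          (0 ≤ p.1 ∧ p.1 < rows ∧ 0 ≤ p.2 ∧ p.2 < cols ∧ p.1 + p.2 ≤ d) ∨
          p ∈ pvSeg (d + 1) (max 0 (d + 1 - (cols - 1)))
            (pvHi rows cols d (max 0 (d - (cols - 1)))) := by
        intro p; rw [hv p, hq0]; simp
      obtain ⟨vis', hfold, hchar⟩ :=
        pvPass rows cols d hr hc hd0 (by omega)
          (min (rows - 1) d + 1 - max 0 (d - (cols - 1))).toNat
          (max 0 (d - (cols - 1))) rfl le_rfl (by omega) [] vis hv'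
      rw [hq0] at hfold
      have hhi : pvHi rows cols d (min (rows - 1) d + 1) = min (rows - 1) (d + 1) := by
        unfold pvHi; rw [if_pos (by omega)]; omega
      rw [hhi] at hfold hchar
      rw [pvLoop, if_neg hne, hfold]
      have hchar' : ∀ p : Int × Int, p ∈ vis' ↔
          0 ≤ p.1 ∧ p.1 < rows ∧ 0 ≤ p.2 ∧ p.2 < cols ∧ p.1 + p.2 ≤ d + 1 := by
        intro p; rw [hchar p, pvSeg_mem]; omega
      rw [PySem.List.pyRange_one_cons (by omega), List.map_cons]
      simp only [List.nil_append]
      exact congrArg _ (ih (d + 1) vis' (by omega) (by omega) hchar')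

-- ===== VERDICT (by name: the statement is the Claim_ definition above) =====
theorem bfs_level_by_level_spec : Claim_equal_bfs_level_by_level := by
  intro matrix hdom hpre
  obtain ⟨hne, hrow⟩ := hpre
  match matrix, hne with
  | row0 :: rest, _ =>
    have hrow0 : row0 ≠ [] := by simpa using hrow
    unfold Spec_bfs_level_by_level bfs_level_by_level bfs_level_by_level_alt
    have hr : 1 ≤ ((row0 :: rest).length : Int) := by simp
    have hc : 1 ≤ (row0.length : Int) := by
      have : 0 < row0.length := List.length_pos_iff.mpr hrow0
      omega
    have hq : [((0 : Int), (0 : Int))]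
        = pvSeg 0 (max 0 (0 - ((row0.length : Int) - 1)))
            (min (((row0 :: rest).length : Int) - 1) 0) := by
      rw [show max 0 (0 - ((row0.length : Int) - 1)) = 0 by omega,
          show min (((row0 :: rest).length : Int) - 1) 0 = 0 by omega,
          pvSeg_cons _ _ _ (by omega), pvSeg_nil _ _ _ (by omega)]
      norm_num
    have hv : ∀ p : Int × Int, p ∈ PySem.Set.ofList [((0 : Int), (0 : Int))] ↔
        0 ≤ p.1 ∧ p.1 < ((row0 :: rest).length : Int) ∧ 0 ≤ p.2 ∧
          p.2 < (row0.length : Int) ∧ p.1 + p.2 ≤ 0 := by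
      intro p
      rw [PySem.Set.mem_ofList]
      simp [Prod.ext_iff]
      omega
    nth_rewrite 1 [hq]
    exact pvLoop_inv ((row0 :: rest).length : Int) (row0.length : Int) hr hc _ 0 _
      le_rfl (by omega) hv
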